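-- pv_equiv track=rewrite | github.com/tolokoban/articles | labs/balanced-targets/grids.py | swapName
-- ===== SOURCE A (Python) =====
-- def swapName(name, swap):
--     items = name.split(",")
--     A = ord("A")
--     candidate = []
--     for item in items:
--         letters = []
--         for c in item:
--             index = ord(c) - A
--             letters.append(swap[index])
--         candidate.append("".join(letters))
--     return ",".join(candidate)
-- ===== SOURCE B (Python) =====
-- def swapName(name, swap):
--     A = ord("A")
--     table = {}
--     for c in name:
--         if c not in table:
--             table[c] = "," if c == "," else swap[ord(c) - A]
--     return "".join(table[c] for c in name)
-- ===== Notes on version B (the rewrite author's own statement) =====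
-- stated objective: alternative
-- what changed: Replaces the split-on-comma plus two nested loops and double join with a memo dictionary built once over the distinct characters of name (comma mapping to itself), followed by a single join of per-character table lookups.
import Mathlib
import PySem

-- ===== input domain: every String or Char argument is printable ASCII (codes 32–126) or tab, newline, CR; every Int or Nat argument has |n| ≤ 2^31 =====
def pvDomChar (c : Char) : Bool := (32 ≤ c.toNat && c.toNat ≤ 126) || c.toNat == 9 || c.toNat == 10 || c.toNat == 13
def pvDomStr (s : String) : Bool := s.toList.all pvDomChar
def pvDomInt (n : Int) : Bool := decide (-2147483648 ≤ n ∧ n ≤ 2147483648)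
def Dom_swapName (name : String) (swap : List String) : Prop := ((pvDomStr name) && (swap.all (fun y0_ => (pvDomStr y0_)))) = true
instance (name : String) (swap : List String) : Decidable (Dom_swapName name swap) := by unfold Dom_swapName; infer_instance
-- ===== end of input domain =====

-- B replaces A's split-on-comma plus two nested loops and double join by a memo
-- dictionary built once over the distinct characters of name (comma maps to itself),
-- then one join of per-character lookups; objective: alternative decomposition.

-- ===== PORT A =====
-- split on ",", then for each piece map each char through swap[ord(c)-ord('A')],
-- join each piece with "" and the pieces with ",".  swap[index] is pyGet? (negative
-- index wraps, out of range = IndexError, excluded by Pre_); getD "" never fires under Pre_.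
def swapName (name : String) (swap : List String) : String :=
  let items := (PySem.Str.split? name ",").getD []
  let a : Int := ('A'.toNat : Int)
  let candidate := items.map (fun item =>
    PySem.Str.join "" (item.toList.map (fun c =>
      (PySem.List.pyGet? swap ((c.toNat : Int) - a)).getD "")))
  PySem.Str.join "," candidate

-- ===== PORT B =====
-- build table : Dict Char String over the distinct chars of name (first pass),
-- then join the per-character lookups (second pass).  table[c] under Pre_ is
-- always present; getD "" never fires under Pre_.
def swapName_alt (name : String) (swap : List String) : String :=
  let a : Int := ('A'.toNat : Int)
  let table := name.toList.foldl
    (fun (d : PySem.Dict Char String) c =>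
      if d.contains c then d
      else d.insert c (if c = ',' then ","
                       else (PySem.List.pyGet? swap ((c.toNat : Int) - a)).getD ""))
    PySem.Dict.empty
  PySem.Str.join "" (name.toList.map (fun c => table.getD c ""))

-- ===== PRECONDITION & SPEC =====
-- Pre_ excludes exactly the inputs where the Python A raises IndexError:
-- some non-comma character whose index ord(c)-65 is outside [-len(swap), len(swap)).
def Pre_swapName (name : String) (swap : List String) : Prop :=
  (name.toList.all (fun c =>
    c == ',' || decide (PySem.Raise.InRange swap.length ((c.toNat : Int) - 65)))) = true
instance (name : String) (swap : List String) : Decidable (Pre_swapName name swap) := by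
  unfold Pre_swapName; infer_instance

def pvWitness_swapName : String × List String := ("A,B", ["X", "Y"])

def Spec_swapName (name : String) (swap : List String) (out : String) : Prop := out = swapName_alt name swap
instance (name : String) (swap : List String) (out : String) : Decidable (Spec_swapName name swap out) := by unfold Spec_swapName; infer_instance

-- ===== CLAIM (what is proved, stated in full; the proofs are below) =====
def Claim_equal_swapName : Prop := ∀ (name : String) (swap : List String), Dom_swapName name swap → Pre_swapName name swap → Spec_swapName name swap (swapName name swap)

-- ===== LEMMAS AND PROOFS =====

-- ---- the memo-table loop of B computes the pure function f on every char of the list ----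

def memoStep (f : Char → String) (d : PySem.Dict Char String) (c : Char) : PySem.Dict Char String :=
  if d.contains c then d else d.insert c (f c)

-- the invariant: every stored value is f of its key
def MemoInv (f : Char → String) (d : PySem.Dict Char String) : Prop :=
  ∀ k, d.contains k = true → d.getD k "" = f k

theorem memoInv_step (f : Char → String) (d : PySem.Dict Char String) (c : Char)
    (h : MemoInv f d) : MemoInv f (memoStep f d c) := by
  intro k hk
  unfold memoStep at hk ⊢
  by_cases hc : d.contains c = true
  · rw [if_pos hc] at hk ⊢; exact h k hk
  · rw [if_neg hc] at hk ⊢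
    rw [PySem.Dict.getD_insert]
    by_cases hkc : k = c
    · rw [if_pos hkc, hkc]
    · rw [if_neg hkc]
      rw [PySem.Dict.contains_insert] at hk
      rcases (Bool.or_eq_true _ _).mp hk with h1 | h1
      · exact absurd (beq_iff_eq.mp h1) hkc
      · exact h k h1

theorem memoInv_foldl (f : Char → String) (cs : List Char) (d : PySem.Dict Char String)
    (h : MemoInv f d) : MemoInv f (cs.foldl (memoStep f) d) := by
  induction cs generalizing d with
  | nil => exact h
  | cons c rest ih => exact ih _ (memoInv_step f d c h)

theorem contains_memo_foldl (f : Char → String) (cs : List Char) (d : PySem.Dict Char String)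
    (k : Char) (h : d.contains k = true) : (cs.foldl (memoStep f) d).contains k = true := by
  induction cs generalizing d with
  | nil => exact h
  | cons c rest ih =>
    apply ih
    unfold memoStep
    split_ifs with hc
    · exact h
    · rw [PySem.Dict.contains_insert, h]; simp

theorem mem_contains_memo_foldl (f : Char → String) :
    ∀ (cs : List Char) (d : PySem.Dict Char String) (k : Char), k ∈ cs →
      (cs.foldl (memoStep f) d).contains k = true
  | c :: rest, d, k, h => by
    rw [List.foldl_cons]
    rcases List.mem_cons.mp h with h | h
    · apply contains_memo_foldl
      subst h
      unfold memoStep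
      split_ifs with hc
      · exact hc
      · exact PySem.Dict.contains_insert_self _ _ _
    · exact mem_contains_memo_foldl f rest _ k h

theorem memo_getD (f : Char → String) (cs : List Char) (k : Char) (h : k ∈ cs) :
    (cs.foldl (memoStep f) PySem.Dict.empty).getD k "" = f k := by
  apply memoInv_foldl f cs PySem.Dict.empty (fun k hk => by simp at hk)
  exact mem_contains_memo_foldl f cs _ k h

-- ---- character-level analysis of A's split / nested loops / joins ----

-- reference single-char-separator split, structural recursion
def mySplit : List Char → List (List Char)
  | [] => [[]]
  | c :: rest => if c = ',' then [] :: mySplit rest else (mySplit rest).modifyHead (c :: ·)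

theorem mySplit_ne_nil (cs : List Char) : mySplit cs ≠ [] := by
  cases cs with
  | nil => simp [mySplit]
  | cons c rest =>
    simp only [mySplit]
    split_ifs
    · simp
    · cases h : mySplit rest with
      | nil => exact absurd h (mySplit_ne_nil rest)
      | cons p ps => simp

theorem modifyHead_id {α : Type} (l : List α) : List.modifyHead (fun x => x) l = l := by
  cases l <;> simp

theorem splitOn_go_comma (fuel : Nat) (l cur : List Char) (acc : List (List Char))
    (h : l.length < fuel) :
    PySem.Chars.splitOn.go [','] fuel l cur acc
      = acc.reverse ++ (mySplit l).modifyHead (cur.reverse ++ ·) := by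
  induction fuel generalizing l cur acc with
  | zero => omega
  | succ f ih =>
    cases l with
    | nil => simp [PySem.Chars.splitOn.go, mySplit]
    | cons c rest =>
      simp only [PySem.Chars.splitOn.go]
      by_cases hc : c = ','
      · have hp : List.isPrefixOf [','] (c :: rest) = true := by simp [hc, List.isPrefixOf]
        rw [if_pos hp]
        subst hc
        rw [ih _ _ _ (by simpa using Nat.lt_of_succ_lt_succ h)]
        simp [mySplit, modifyHead_id]
      · have hp : List.isPrefixOf [','] (c :: rest) = false := by
          simp [List.isPrefixOf]; exact fun h' => hc h'.symm
        rw [if_neg (by simp [hp])]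
        rw [ih _ _ _ (by simpa using Nat.lt_of_succ_lt_succ h)]
        simp only [mySplit, if_neg hc]
        cases hms : mySplit rest with
        | nil => exact absurd hms (mySplit_ne_nil rest)
        | cons p ps => simp

theorem splitOn_comma (cs : List Char) : PySem.Chars.splitOn cs [','] = mySplit cs := by
  have := splitOn_go_comma (cs.length + 1) cs [] [] (by omega)
  simpa [PySem.Chars.splitOn, modifyHead_id] using this

-- join with a prefix glued onto the head piece
theorem join_head_append (sep a p : List Char) (L : List (List Char)) :
    PySem.Chars.join sep ((a ++ p) :: L) = a ++ PySem.Chars.join sep (p :: L) := by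
  cases L with
  | nil => simp [PySem.Chars.join_singleton]
  | cons q rest => simp [PySem.Chars.join_cons_cons]

theorem join_nil_flatten : ∀ (L : List (List Char)), PySem.Chars.join [] L = L.flatten
  | [] => by simp [PySem.Chars.join, List.intercalate]
  | [p] => by simp [PySem.Chars.join_singleton]
  | p :: q :: rest => by
      rw [PySem.Chars.join_cons_cons, join_nil_flatten (q :: rest)]; simp

-- the core char-level equivalence, by induction over name's characters
theorem core (sw : Char → List Char) (cs : List Char) :
    PySem.Chars.join [','] ((mySplit cs).map (fun p => (p.map sw).flatten))
      = (cs.map (fun c => if c = ',' then [','] else sw c)).flatten := by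
  induction cs with
  | nil => simp [mySplit, PySem.Chars.join_singleton]
  | cons c rest ih =>
    simp only [mySplit]
    by_cases hc : c = ','
    · subst hc
      rw [if_pos rfl]
      cases hms : mySplit rest with
      | nil => exact absurd hms (mySplit_ne_nil rest)
      | cons p ps =>
        rw [hms] at ih
        simp only [List.map_cons] at ih
        simp [PySem.Chars.join_cons_cons, ih]
    · rw [if_neg hc]
      cases hms : mySplit rest with
      | nil => exact absurd hms (mySplit_ne_nil rest)
      | cons p ps =>
        rw [hms] at ih
        simp only [List.modifyHead, List.map_cons, List.flatten_cons]
        rw [join_head_append]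
        simp only [List.map_cons] at ih
        rw [show PySem.Chars.join [','] ((List.map sw p).flatten :: List.map (fun q => (List.map sw q).flatten) ps) = (List.map (fun c => if c = ',' then [','] else sw c) rest).flatten from ih]
        simp [hc]

-- ===== VERDICT (by name: the statement is the Claim_ definition above) =====
theorem swapName_spec : Claim_equal_swapName := by
  intro name swap _ _
  unfold Spec_swapName swapName swapName_alt
  apply String.ext
  -- the pure per-char function both sides compute
  set f : Char → String :=
    fun c => if c = ',' then ","
             else (PySem.List.pyGet? swap ((c.toNat : Int) - ('A'.toNat : Int))).getD "" with hf
  -- B side: the memo lookups are f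
  have hB : List.map (fun c =>
        (name.toList.foldl (memoStep f) PySem.Dict.empty).getD c "") name.toList
      = name.toList.map f := by
    apply List.map_congr_left
    intro c hc
    exact memo_getD f name.toList c hc
  show _ = (PySem.Str.join "" (name.toList.map (fun c =>
      ((name.toList.foldl (fun d c => if PySem.Dict.contains d c then d
        else PySem.Dict.insert d c (if c = ',' then ","
          else (PySem.List.pyGet? swap ((c.toNat : Int) - ('A'.toNat : Int))).getD ""))
        PySem.Dict.empty)).getD c ""))).toList
  have hstep : (fun (d : PySem.Dict Char String) c => if PySem.Dict.contains d c then d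
        else PySem.Dict.insert d c (if c = ',' then ","
          else (PySem.List.pyGet? swap ((c.toNat : Int) - ('A'.toNat : Int))).getD ""))
      = memoStep f := by
    funext d c; simp [memoStep, hf]
  rw [hstep, hB]
  -- now both sides are joins of maps of pure functions; reduce to char lists
  simp only [PySem.Str.toList_join, List.map_map, Function.comp_def]
  have hsplit : ((PySem.Str.split? name ",").getD []).map String.toList = mySplit name.toList := by
    have h := PySem.Str.split?_map name ","
    rw [show (",".toList) = [','] from rfl] at h
    rw [show PySem.Chars.split? name.toList [','] = some (mySplit name.toList) by
      simp [PySem.Chars.split?, splitOn_comma]] at h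
    cases hs : PySem.Str.split? name "," with
    | none => rw [hs] at h; simp at h
    | some l => rw [hs] at h; simpa using h
  set sw : Char → List Char :=
    fun c => ((PySem.List.pyGet? swap ((c.toNat : Int) - ('A'.toNat : Int))).getD "").toList with hsw
  rw [show (",".toList) = [','] from rfl, show ("".toList) = ([] : List Char) from rfl]
  simp only [join_nil_flatten]
  have l1 : (List.map (fun x => (List.map sw x.toList).flatten) ((PySem.Str.split? name ",").getD []))
      = List.map (fun p => (List.map sw p).flatten) (mySplit name.toList) := by
    rw [← hsplit, List.map_map]
    rfl
  rw [l1, core sw]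
  congr 1
  apply List.map_congr_left
  intro c _
  by_cases hc : c = ',' <;> simp [hc, hsw, hf]
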